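-- pv_equiv track=rewrite | github.com/DarkStussy/aiochlite | aiochlite/converters/from_clickhouse.py | _extract_base_type
-- ===== SOURCE A (Python) =====
-- def _extract_base_type(ch_type: str) -> str:
--     """Extract base type from ClickHouse type."""
--     if ch_type.startswith("Nullable("):
--         inner = ch_type[9:-1]
--         return _extract_base_type(inner)
--
--     if ch_type.startswith("LowCardinality("):
--         inner = ch_type[15:-1]
--         return _extract_base_type(inner)
--
--     if "(" in ch_type:
--         return ch_type[: ch_type.index("(")]
--
--     return ch_type
-- ===== SOURCE B (Python) =====
-- def _extract_base_type(ch_type: str) -> str: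
--     """Extract base type from ClickHouse type."""
--     # Index arithmetic over the original string: peel wrapper layers by moving a
--     # [pos, end) window (never building intermediate slice strings), then advance
--     # a cursor to the first "(" inside the window and return that one slice.
--     pos, end = 0, len(ch_type)
--     while True:
--         if pos + 9 <= end and ch_type.startswith("Nullable(", pos):
--             pos, end = pos + 9, end - 1
--         elif pos + 15 <= end and ch_type.startswith("LowCardinality(", pos):
--             pos, end = pos + 15, end - 1
--         else:
--             break
--     i = pos
--     while i < end and ch_type[i] != "(":
--         i += 1
--     return ch_type[pos:i]
-- ===== Notes on version B (the rewrite author's own statement) =====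
-- stated objective: alternative
-- what changed: Replaces A's recursion that materialises a new slice string per wrapper layer (and uses substring membership plus .index for the final cut) with index arithmetic on the original string: a loop moving a [pos,end) window one wrapper layer per step, then a cursor scan to the first opening parenthesis and a single final slice.
import Mathlib
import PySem

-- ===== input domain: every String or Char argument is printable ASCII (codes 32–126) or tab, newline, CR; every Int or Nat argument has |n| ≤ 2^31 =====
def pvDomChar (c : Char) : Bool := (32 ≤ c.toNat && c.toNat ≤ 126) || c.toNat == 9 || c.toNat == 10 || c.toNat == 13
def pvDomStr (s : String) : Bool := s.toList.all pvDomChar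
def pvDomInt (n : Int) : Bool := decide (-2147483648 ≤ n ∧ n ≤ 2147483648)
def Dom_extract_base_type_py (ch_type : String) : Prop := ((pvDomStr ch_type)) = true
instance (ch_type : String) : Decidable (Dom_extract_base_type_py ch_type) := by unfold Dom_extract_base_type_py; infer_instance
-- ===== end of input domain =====

-- B replaces A's slice-building recursion with index arithmetic on the original string: a peel loop moving a [pos,end) window plus a cursor scan to the first opening parenthesis (alternative decomposition, same cost class).


-- ===== PORT A =====
-- length of s[a:-1] is smaller than s's for 0 < a ≤ len(s); cited by port A's decreasing_by.
theorem pvSliceDec (l : List Char) (a : Int) (ha : 0 < a)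
    (h : ∃ p : List Char, p.isPrefixOf l = true ∧ (p.length : Int) = a) :
    (PySem.List.slice l (some a) (some (-1))).length < l.length := by
  obtain ⟨p, hp, hpl⟩ := h
  have hle : p.length ≤ l.length := (List.isPrefixOf_iff_prefix.mp hp).length_le
  have hlen : a ≤ (l.length : Int) := by omega
  have hne : l ≠ [] := List.ne_nil_of_length_pos (by omega)
  simp [PySem.List.length_slice, PySem.List.clampIdx, hne]
  split_ifs <;> omega

-- A recursively strips "Nullable(...)" / "LowCardinality(...)" by slicing, then cuts at the first '(' via `in` + `.index`.
def pvExtractA (l : List Char) : List Char :=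
  if ("Nullable(".toList).isPrefixOf l then
    pvExtractA (PySem.List.slice l (some 9) (some (-1)))
  else if ("LowCardinality(".toList).isPrefixOf l then
    pvExtractA (PySem.List.slice l (some 15) (some (-1)))
  else if '(' ∈ l then
    match PySem.List.index? l '(' with
    | some i => PySem.List.slice l none (some (i : Int))
    | none => l
  else l
termination_by l.length
decreasing_by
  · exact pvSliceDec l 9 (by norm_num) ⟨_, by assumption, by simp⟩
  · exact pvSliceDec l 15 (by norm_num) ⟨_, by assumption, by simp⟩

def extract_base_type_py (ch_type : String) : String :=
  String.ofList (pvExtractA ch_type.toList)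

-- ===== PORT B =====
-- Source B's peel loop: move the [pos, end) window over the fixed string, one wrapper layer per step.
def pvStrip (l : List Char) (pos endd : Nat) : Nat × Nat :=
  if pos + 9 ≤ endd ∧ ("Nullable(".toList).isPrefixOf (l.drop pos) then
    pvStrip l (pos + 9) (endd - 1)
  else if pos + 15 ≤ endd ∧ ("LowCardinality(".toList).isPrefixOf (l.drop pos) then
    pvStrip l (pos + 15) (endd - 1)
  else (pos, endd)
termination_by endd - pos
decreasing_by all_goals omega

-- Source B's cursor scan `while i < end and ch_type[i] != "(": i += 1`.
def pvScanFrom (l : List Char) (i endd : Nat) : Nat :=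
  if i < endd ∧ l[i]? ≠ some '(' then pvScanFrom l (i + 1) endd else i
termination_by endd - i
decreasing_by omega

def extract_base_type_py_alt (ch_type : String) : String :=
  let l := ch_type.toList
  let pe := pvStrip l 0 l.length
  let i := pvScanFrom l pe.1 pe.2
  String.ofList (PySem.List.slice l (some (pe.1 : Int)) (some (i : Int)))

-- ===== PRECONDITION & SPEC =====
def Spec_extract_base_type_py (ch_type : String) (out : String) : Prop := out = extract_base_type_py_alt ch_type
instance (ch_type : String) (out : String) : Decidable (Spec_extract_base_type_py ch_type out) := by unfold Spec_extract_base_type_py; infer_instance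

-- ===== CLAIM (what is proved, stated in full; the proofs are below) =====
def Claim_equal_extract_base_type_py : Prop := ∀ (ch_type : String), Dom_extract_base_type_py ch_type → Spec_extract_base_type_py ch_type (extract_base_type_py ch_type)

-- ===== LEMMAS AND PROOFS =====

-- characterisation of A's final branch as "take up to the first '('"
def pvScan : List Char → Nat
  | [] => 0
  | c :: t => if c = '(' then 0 else pvScan t + 1

theorem pvScan_le_length (l : List Char) : pvScan l ≤ l.length := by
  induction l with
  | nil => simp [pvScan]
  | cons c t ih => simp only [pvScan, List.length_cons]; split_ifs <;> omega

-- A's final branch ("in" + ".index" + take) equals pvScan's cut.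
theorem final_take (l : List Char) :
    (if '(' ∈ l then
      match List.idxOf? '(' l with
      | some i => l.take i
      | none => l
    else l) = l.take (pvScan l) := by
  induction l with
  | nil => simp
  | cons c t ih =>
    by_cases hc : c = '('
    · subst hc
      simp [List.idxOf?_cons, pvScan]
    · have hbc : (c == '(') = false := by simp [hc]
      by_cases hm : '(' ∈ t
      · obtain ⟨i, hi⟩ := Option.isSome_iff_exists.mp (List.isSome_idxOf?.mpr hm)
        have key : t.take i = t.take (pvScan t) := by
          have h := ih
          rw [if_pos hm, hi] at h
          exact h
        have hmem : '(' ∈ c :: t := List.mem_cons_of_mem _ hm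
        rw [if_pos hmem, List.idxOf?_cons, if_neg (by simp [hbc])]
        rw [hi]
        simp only [Option.map_some]
        show (c :: t).take (i + 1) = (c :: t).take (pvScan (c :: t))
        simp [pvScan, hc, List.take_succ_cons, key]
      · have hmem : '(' ∉ c :: t := by simp [hm, Ne.symm hc]
        have ht : t = t.take (pvScan t) := by
          have h := ih
          rw [if_neg hm] at h
          exact h
        rw [if_neg hmem]
        show c :: t = (c :: t).take (pvScan (c :: t))
        simp only [pvScan, hc, if_false, List.take_succ_cons]
        exact congrArg (c :: ·) ht

-- s[a:-1] with a natural start is "drop last, then drop a".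
theorem slice_neg_one_eq (xs : List Char) (a : Nat) :
    PySem.List.slice xs (some (a : Int)) (some (-1)) = xs.dropLast.drop a := by
  show List.take (PySem.List.clampIdx xs.length (-1) - PySem.List.clampIdx xs.length (a : Int))
      (List.drop (PySem.List.clampIdx xs.length (a : Int)) xs) = _
  rw [PySem.List.clampIdx_neg_one, PySem.List.clampIdx_natCast, List.dropLast_eq_take, List.drop_take]
  by_cases h : a ≤ xs.length
  · rw [min_eq_left h]
  · rw [min_eq_right (by omega), List.drop_length]
    simp [List.drop_eq_nil_of_le, Nat.le_of_not_le h]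

-- the window [pos, endd) as a list
def pvWin (l : List Char) (pos endd : Nat) : List Char := (l.drop pos).take (endd - pos)

-- prefix check on the window = bound check + prefix check on the full string at pos
theorem prefix_win_iff (l p : List Char) (pos endd : Nat) (hp0 : 0 < p.length) :
    p.isPrefixOf (pvWin l pos endd) = true ↔
      (pos + p.length ≤ endd ∧ p.isPrefixOf (l.drop pos) = true) := by
  rw [List.isPrefixOf_iff_prefix, List.isPrefixOf_iff_prefix, pvWin]
  constructor
  · intro h
    have h1 : p <+: l.drop pos := h.trans (List.take_prefix _ _)
    have h2 : p.length ≤ ((l.drop pos).take (endd - pos)).length := h.length_le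
    simp only [List.length_take, List.length_drop] at h2
    exact ⟨by omega, h1⟩
  · rintro ⟨hb, hp⟩
    rw [List.prefix_iff_eq_take] at hp ⊢
    rw [List.take_take, min_eq_left (by omega)]
    exact hp

-- peeling one layer of size a (a = prefix length) inside the window
theorem win_peel (l : List Char) (pos endd a : Nat) (hend : endd ≤ l.length)
    (hb : pos + a ≤ endd) :
    (pvWin l pos endd).dropLast.drop a = pvWin l (pos + a) (endd - 1) := by
  unfold pvWin
  have hlen : (l.drop pos).length = l.length - pos := List.length_drop
  rw [List.dropLast_eq_take, List.take_take, List.drop_take, List.drop_drop]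
  congr 1
  simp only [List.length_take, hlen]
  omega

-- the cursor scan measured from pos equals pvScan of the window
theorem scan_eq (l : List Char) (endd : Nat) (hend : endd ≤ l.length) : ∀ i : Nat,
    pvScanFrom l i endd = i + pvScan (pvWin l i endd) := by
  intro i
  induction i using pvScanFrom.induct l endd with
  | case1 i h ih =>
    have hi : i < l.length := by omega
    have hget : l[i]? = some l[i] := List.getElem?_eq_getElem hi
    have hci : l[i] ≠ '(' := by
      intro hc; exact h.2 (by rw [hget, hc])
    rw [pvScanFrom, if_pos h, ih]
    have hwin : pvWin l i endd = l[i] :: pvWin l (i + 1) endd := by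
      unfold pvWin
      rw [List.drop_eq_getElem_cons hi]
      have : endd - i = (endd - (i + 1)) + 1 := by omega
      rw [this, List.take_succ_cons]
    rw [hwin]
    simp only [pvScan, hci, if_false]
    omega
  | case2 i h =>
    rw [pvScanFrom, if_neg h]
    rcases Decidable.not_and_iff_not_or_not.mp h with hge | hne
    · have : endd - i = 0 := by omega
      simp [pvWin, this, pvScan]
    · have hne' : l[i]? = some '(' := Decidable.not_not.mp hne
      have hi : i < l.length := by
        by_contra hc
        rw [List.getElem?_eq_none (by omega)] at hne'
        simp at hne'
      have hci : l[i] = '(' := by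
        rw [List.getElem?_eq_getElem hi] at hne'
        exact Option.some.inj hne'
      by_cases hlt : i < endd
      · have : pvWin l i endd = l[i] :: (l.drop (i+1)).take (endd - (i + 1)) := by
          unfold pvWin
          rw [List.drop_eq_getElem_cons hi]
          rw [(by omega : endd - i = (endd - (i + 1)) + 1), List.take_succ_cons]
        rw [this]
        simp [pvScan, hci]
      · have : endd - i = 0 := by omega
        simp [pvWin, this, pvScan]

-- main invariant: A on the window = final cut of the stripped window
theorem strip_eq (l : List Char) : ∀ pos endd : Nat, endd ≤ l.length →
    pvExtractA (pvWin l pos endd) =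
      (pvWin l (pvStrip l pos endd).1 (pvStrip l pos endd).2).take
        (pvScan (pvWin l (pvStrip l pos endd).1 (pvStrip l pos endd).2)) := by
  intro pos endd
  induction pos, endd using pvStrip.induct l with
  | case1 pos endd h ih =>
    intro hend
    have hpre : ("Nullable(".toList).isPrefixOf (pvWin l pos endd) = true :=
      (prefix_win_iff l _ pos endd (by decide)).mpr ⟨h.1, h.2⟩
    rw [pvExtractA, if_pos hpre, pvStrip, if_pos h]
    rw [(by norm_num : (9:Int) = ((9:Nat):Int)), slice_neg_one_eq, win_peel l pos endd 9 hend h.1]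
    exact ih (by omega)
  | case2 pos endd h1 h2 ih =>
    intro hend
    have hpre1 : ("Nullable(".toList).isPrefixOf (pvWin l pos endd) = false := by
      rw [← Bool.not_eq_true]
      intro hc
      exact h1 ⟨((prefix_win_iff l _ pos endd (by decide)).mp hc).1, ((prefix_win_iff l _ pos endd (by decide)).mp hc).2⟩
    have hpre2 : ("LowCardinality(".toList).isPrefixOf (pvWin l pos endd) = true :=
      (prefix_win_iff l _ pos endd (by decide)).mpr ⟨h2.1, h2.2⟩
    rw [pvExtractA, hpre1]
    simp only [Bool.false_eq_true, if_false]
    rw [if_pos hpre2, pvStrip, if_neg h1, if_pos h2]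
    rw [(by norm_num : (15:Int) = ((15:Nat):Int)), slice_neg_one_eq, win_peel l pos endd 15 hend h2.1]
    exact ih (by omega)
  | case3 pos endd h1 h2 =>
    intro hend
    have hpre1 : ("Nullable(".toList).isPrefixOf (pvWin l pos endd) = false := by
      rw [← Bool.not_eq_true]
      intro hc
      exact h1 ⟨((prefix_win_iff l _ pos endd (by decide)).mp hc).1, ((prefix_win_iff l _ pos endd (by decide)).mp hc).2⟩
    have hpre2 : ("LowCardinality(".toList).isPrefixOf (pvWin l pos endd) = false := by
      rw [← Bool.not_eq_true]
      intro hc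
      exact h2 ⟨((prefix_win_iff l _ pos endd (by decide)).mp hc).1, ((prefix_win_iff l _ pos endd (by decide)).mp hc).2⟩
    rw [pvStrip, if_neg h1, if_neg h2]
    set w := pvWin l pos endd with hw
    rw [pvExtractA, hpre1]
    simp only [Bool.false_eq_true, if_false]
    rw [hpre2]
    simp only [Bool.false_eq_true, if_false]
    have h := final_take w
    by_cases hm : '(' ∈ w
    · rw [if_pos hm] at h ⊢
      obtain ⟨i, hi⟩ := Option.isSome_iff_exists.mp (List.isSome_idxOf?.mpr hm)
      rw [PySem.List.index?_eq_idxOf?, hi]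
      rw [hi] at h
      show PySem.List.slice w none (some (i : Int)) = _
      rw [PySem.List.slice_to_natCast]
      exact h
    · rw [if_neg hm] at h ⊢
      exact h

-- the end of the window never grows
theorem strip_end_le (l : List Char) : ∀ pos endd : Nat, (pvStrip l pos endd).2 ≤ endd := by
  intro pos endd
  induction pos, endd using pvStrip.induct l with
  | case1 pos endd h ih => rw [pvStrip, if_pos h]; omega
  | case2 pos endd h1 h2 ih => rw [pvStrip, if_neg h1, if_pos h2]; omega
  | case3 pos endd h1 h2 => rw [pvStrip, if_neg h1, if_neg h2]

-- ===== VERDICT (by name: the statement is the Claim_ definition above) =====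
theorem extract_base_type_py_spec : Claim_equal_extract_base_type_py := by
  intro s _
  unfold Spec_extract_base_type_py extract_base_type_py extract_base_type_py_alt
  simp only []
  set l := s.toList with hl
  set p := (pvStrip l 0 l.length).1 with hp
  set e := (pvStrip l 0 l.length).2 with he
  have hend : e ≤ l.length := strip_end_le l 0 l.length
  rw [scan_eq l e hend p, PySem.List.slice_natCast]
  have hsle : pvScan (pvWin l p e) ≤ e - p := by
    refine le_trans (pvScan_le_length _) ?_
    simp only [pvWin, List.length_take]
    omega
  have hA : pvExtractA l = (pvWin l p e).take (pvScan (pvWin l p e)) := by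
    have hwin0 : pvWin l 0 l.length = l := by
      simp [pvWin]
    have h := strip_eq l 0 l.length (le_refl _)
    rw [hwin0] at h
    exact h
  have hB : (pvWin l p e).take (pvScan (pvWin l p e)) =
      (l.drop p).take (p + pvScan (pvWin l p e) - p) := by
    rw [(by omega : p + pvScan (pvWin l p e) - p = pvScan (pvWin l p e))]
    unfold pvWin at hsle ⊢
    rw [List.take_take, min_eq_left hsle]
  rw [hA, hB]
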